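-- pv_equiv track=rewrite | github.com/mozilla-platform-ops/fleetroll_mvp | fleetroll/commands/monitor/data.py | detect_common_fqdn_suffix
-- ===== SOURCE A (Python) =====
-- def detect_common_fqdn_suffix(hosts: list[str]) -> str | None:
--     """Detect common FQDN suffix across all hosts.
--
--     Returns the common suffix (e.g., '.test.releng.mdc1.mozilla.com') if all hosts
--     share the same suffix, or None if hosts have different suffixes or no FQDN.
--     """
--     if not hosts:
--         return None
--     suffixes = set()
--     for host in hosts:
--         if "." in host:
--             suffix = host[host.index(".") :]
--             suffixes.add(suffix)
--         else:
--             return None  # No FQDN, can't strip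
--     if len(suffixes) == 1:
--         return suffixes.pop()
--     return None  # Multiple suffixes
-- ===== SOURCE B (Python) =====
-- def detect_common_fqdn_suffix(hosts: list[str]) -> str | None:
--     """Detect common FQDN suffix across all hosts.
--
--     B: keep one scalar reference suffix (from the first host) and short-circuit
--     on the first host that lacks a dot or disagrees, instead of collecting a set.
--     """
--     if not hosts:
--         return None
--     first = hosts[0]
--     d = first.find(".")
--     if d < 0:
--         return None
--     candidate = first[d:]
--     for host in hosts[1:]:
--         d = host.find(".")
--         if d < 0 or host[d:] != candidate:
--             return None
--     return candidate
-- ===== Notes on version B (the rewrite author's own statement) =====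
-- stated objective: simpler
-- what changed: B keeps a single reference suffix taken from the first host and returns None at the first host that lacks a dot or whose first-dot suffix differs, instead of accumulating a set of all suffixes and testing len==1 at the end.
import Mathlib
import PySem

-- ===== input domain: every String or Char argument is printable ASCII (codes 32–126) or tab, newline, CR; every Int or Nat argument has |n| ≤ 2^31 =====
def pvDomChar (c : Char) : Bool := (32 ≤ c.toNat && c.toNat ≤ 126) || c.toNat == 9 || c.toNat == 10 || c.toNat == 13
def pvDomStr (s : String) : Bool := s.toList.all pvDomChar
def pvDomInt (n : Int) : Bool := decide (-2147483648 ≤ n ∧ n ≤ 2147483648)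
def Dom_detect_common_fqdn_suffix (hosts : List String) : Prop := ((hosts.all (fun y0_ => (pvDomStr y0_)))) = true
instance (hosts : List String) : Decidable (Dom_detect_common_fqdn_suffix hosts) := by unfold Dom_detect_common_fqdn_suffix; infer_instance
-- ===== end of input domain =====

-- B replaces A's set of all suffixes by one reference suffix with early exit; objective: simpler.

-- ===== PORT A =====
-- A's loop: accumulate the set of first-dot suffixes, bail out on a dotless host.
-- host[host.index("."):] is ported as Str.slice from Str.find: inside the '"." in host'
-- guard, .index equals .find (exact there; .index would raise only when the guard is false).
def pvALoop (l : List String) (suffixes : PySem.Set String) : Option String :=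
  match l with
  | [] => if PySem.Set.len suffixes = 1 then suffixes.head? else none
  | host :: rest =>
      if PySem.Str.isIn "." host then
        pvALoop rest (PySem.Set.add suffixes (PySem.Str.slice host (some (PySem.Str.find host ".")) none))
      else none

def detect_common_fqdn_suffix (hosts : List String) : Option String :=
  match hosts with
  | [] => none
  | _ => pvALoop hosts PySem.Set.empty

-- ===== PORT B =====
-- B's loop: compare every remaining host's first-dot suffix with the candidate, short-circuiting.
def pvBLoop (candidate : String) (l : List String) : Option String :=
  match l with
  | [] => some candidate
  | host :: rest =>
      let d := PySem.Str.find host "."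
      if d < 0 ∨ PySem.Str.slice host (some d) none ≠ candidate then none
      else pvBLoop candidate rest

def detect_common_fqdn_suffix_alt (hosts : List String) : Option String :=
  match hosts with
  | [] => none
  | first :: rest =>
      let d := PySem.Str.find first "."
      if d < 0 then none
      else pvBLoop (PySem.Str.slice first (some d) none) rest

-- ===== PRECONDITION & SPEC =====
def Spec_detect_common_fqdn_suffix (hosts : List String) (out : Option String) : Prop := out = detect_common_fqdn_suffix_alt hosts
instance (hosts : List String) (out : Option String) : Decidable (Spec_detect_common_fqdn_suffix hosts out) := by unfold Spec_detect_common_fqdn_suffix; infer_instance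

-- ===== CLAIM (what is proved, stated in full; the proofs are below) =====
def Claim_equal_detect_common_fqdn_suffix : Prop := ∀ (hosts : List String), Dom_detect_common_fqdn_suffix hosts → Spec_detect_common_fqdn_suffix hosts (detect_common_fqdn_suffix hosts)

-- ===== LEMMAS AND PROOFS =====

-- ".": dot-membership test of A coincides with the non-negativity of B's find.
theorem pv_isIn_iff_find (host : String) :
    PySem.Str.isIn "." host = true ↔ ¬ PySem.Str.find host "." < 0 := by
  rw [PySem.Str.isIn_iff_infix, ← PySem.Str.find_nonneg_iff]
  omega

theorem pv_contains_singleton (a b : String) : PySem.Set.contains [a] b = true ↔ b = a := by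
  simp [PySem.Set.contains, eq_comm]

-- once A's suffix set has ≥ 2 elements the loop can only return none
theorem pvALoop_big (l : List String) (s : PySem.Set String) (h : 2 ≤ s.length) :
    pvALoop l s = none := by
  induction l generalizing s with
  | nil =>
      simp only [pvALoop, PySem.Set.len]
      rw [if_neg (by omega)]
  | cons host rest ih =>
      simp only [pvALoop]
      split
      · exact ih _ (by
          unfold PySem.Set.add
          split
          · exact h
          · simp; omega)
      · rfl

-- A's loop started on a singleton set {c} equals B's loop with candidate c
theorem pvALoop_singleton (l : List String) (c : String) :
    pvALoop l [c] = pvBLoop c l := by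
  induction l with
  | nil => rfl
  | cons host rest ih =>
      simp only [pvALoop, pvBLoop]
      by_cases hdot : PySem.Str.isIn "." host = true
      · have hfind : ¬ PySem.Str.find host "." < 0 := (pv_isIn_iff_find host).mp hdot
        rw [if_pos hdot]
        by_cases heq : PySem.Str.slice host (some (PySem.Str.find host ".")) none = c
        · rw [if_neg (fun h => h.elim hfind (fun hn => hn heq))]
          have : PySem.Set.add [c] (PySem.Str.slice host (some (PySem.Str.find host ".")) none) = [c] := by
            unfold PySem.Set.add
            rw [if_pos ((pv_contains_singleton c _).mpr heq)]
          rw [this, ih]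
        · rw [if_pos (Or.inr heq)]
          have : PySem.Set.add [c] (PySem.Str.slice host (some (PySem.Str.find host ".")) none)
              = [c, PySem.Str.slice host (some (PySem.Str.find host ".")) none] := by
            unfold PySem.Set.add
            rw [if_neg (fun hc => heq ((pv_contains_singleton c _).mp hc))]
            rfl
          rw [this]
          exact pvALoop_big _ _ (by simp)
      · rw [if_neg hdot, if_pos (by left; exact (by
          by_contra hlt
          exact hdot ((pv_isIn_iff_find host).mpr hlt)))]

-- ===== VERDICT (by name: the statement is the Claim_ definition above) =====
theorem detect_common_fqdn_suffix_spec : Claim_equal_detect_common_fqdn_suffix := by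
  intro hosts _
  unfold Spec_detect_common_fqdn_suffix detect_common_fqdn_suffix detect_common_fqdn_suffix_alt
  match hosts with
  | [] => rfl
  | first :: rest =>
      simp only [pvALoop]
      by_cases hdot : PySem.Str.isIn "." first = true
      · have hfind : ¬ PySem.Str.find first "." < 0 := (pv_isIn_iff_find first).mp hdot
        rw [if_pos hdot, if_neg hfind]
        have : PySem.Set.add PySem.Set.empty (PySem.Str.slice first (some (PySem.Str.find first ".")) none)
            = [PySem.Str.slice first (some (PySem.Str.find first ".")) none] := rfl
        rw [this, pvALoop_singleton]
      · rw [if_neg hdot, if_pos (by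
          by_contra hlt
          exact hdot ((pv_isIn_iff_find first).mpr hlt))]
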